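-- pv_equiv track=rewrite | github.com/pohaoc2/PixCell | tools/render_ablation_html_report.py | humanize_token
-- ===== SOURCE A (Python) =====
-- GROUP_LABELS = {
--     "cell_types": "Cell types",
--     "cell_state": "Cell state",
--     "vasculature": "Vasculature",
--     "microenv": "Microenv",
-- }
--
-- METRIC_LABELS = {
--     "cosine": "Cosine",
--     "lpips": "LPIPS",
--     "aji": "AJI",
--     "pq": "PQ",
--     "fud": "FUD",
--     "style_hed": "HED",
-- }
--
-- def humanize_token(value: object) -> str:
--     raw = str(value).strip()
--     if not raw:
--         return raw
--     if raw in METRIC_LABELS: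
--         return METRIC_LABELS[raw]
--     if raw in GROUP_LABELS:
--         return GROUP_LABELS[raw]
--     if "+" in raw:
--         return " + ".join(humanize_token(part) for part in raw.split("+"))
--     return raw.replace("_", " ")
-- ===== SOURCE B (Python) =====
-- GROUP_LABELS = {
--     "cell_types": "Cell types",
--     "cell_state": "Cell state",
--     "vasculature": "Vasculature",
--     "microenv": "Microenv",
-- }
--
-- METRIC_LABELS = {
--     "cosine": "Cosine",
--     "lpips": "LPIPS",
--     "aji": "AJI",
--     "pq": "PQ",
--     "fud": "FUD",
--     "style_hed": "HED",
-- }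
--
--
-- def _leaf(tok: str) -> str:
--     t = tok.strip()
--     if not t:
--         return t
--     if t in METRIC_LABELS:
--         return METRIC_LABELS[t]
--     if t in GROUP_LABELS:
--         return GROUP_LABELS[t]
--     return t.replace("_", " ")
--
--
-- def humanize_token(value: object) -> str:
--     raw = str(value).strip()
--     if not raw:
--         return raw
--     return " + ".join(_leaf(p) for p in raw.split("+"))
-- ===== Notes on version B (the rewrite author's own statement) =====
-- stated objective: simpler
-- what changed: Replaces the self-recursion with a single top-level split on '+' and a non-recursive per-token leaf helper; the single-token case is the one-element split, so no recursion or '+' membership test remains.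
import Mathlib
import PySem

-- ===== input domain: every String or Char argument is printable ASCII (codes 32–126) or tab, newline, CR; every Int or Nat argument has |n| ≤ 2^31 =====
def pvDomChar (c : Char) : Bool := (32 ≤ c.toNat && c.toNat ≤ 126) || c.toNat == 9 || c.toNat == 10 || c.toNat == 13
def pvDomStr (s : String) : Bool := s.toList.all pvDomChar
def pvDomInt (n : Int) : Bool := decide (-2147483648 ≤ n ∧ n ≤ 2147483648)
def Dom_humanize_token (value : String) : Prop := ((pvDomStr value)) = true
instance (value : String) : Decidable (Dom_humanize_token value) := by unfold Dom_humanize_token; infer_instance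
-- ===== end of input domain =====

-- B replaces A's self-recursion by a single top-level split on '+' with a non-recursive per-token helper (simpler decomposition; same result).


-- ===== PORT A =====
-- the two module-level label dicts, shared by both ports (keys/values as List Char)
def GROUP_LABELS : PySem.Dict (List Char) (List Char) :=
  ⟨[("cell_types".toList, "Cell types".toList),
    ("cell_state".toList, "Cell state".toList),
    ("vasculature".toList, "Vasculature".toList),
    ("microenv".toList, "Microenv".toList)]⟩

def METRIC_LABELS : PySem.Dict (List Char) (List Char) :=
  ⟨[("cosine".toList, "Cosine".toList),
    ("lpips".toList, "LPIPS".toList),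
    ("aji".toList, "AJI".toList),
    ("pq".toList, "PQ".toList),
    ("fud".toList, "FUD".toList),
    ("style_hed".toList, "HED".toList)]⟩

-- termination facts A's recursion needs (stated here so the port can cite them; proved below the claim block is not allowed for these two, so proofs are given here)
theorem pv_splitOn_go_no_sep (c : Char) : ∀ (fuel : Nat) (l cur : List Char) (acc : List (List Char)),
    c ∉ cur → (∀ p ∈ acc, c ∉ p) → l.length < fuel →
    ∀ q ∈ PySem.Chars.splitOn.go [c] fuel l cur acc, c ∉ q := by
  intro fuel
  induction fuel with
  | zero => intro l cur acc _ _ h; omega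
  | succ n ih =>
    intro l cur acc hcur hacc hlen q hq
    cases l with
    | nil =>
      simp only [PySem.Chars.splitOn.go] at hq
      rw [List.mem_reverse, List.mem_cons] at hq
      rcases hq with h | h
      · subst h; simp [hcur]
      · exact hacc _ h
    | cons c' rest =>
      simp only [PySem.Chars.splitOn.go] at hq
      by_cases hpre : [c].isPrefixOf (c' :: rest) = true
      · rw [if_pos hpre] at hq
        have hc : c = c' := by
          simpa [List.isPrefixOf] using hpre
        refine ih _ _ _ (by simp) ?_ (by simp at hlen ⊢; omega) q hq
        intro p hp
        rw [List.mem_cons] at hp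
        rcases hp with h | h
        · subst h; simp [hcur]
        · exact hacc _ h
      · rw [if_neg hpre] at hq
        have hc : c' ≠ c := by
          intro h; subst h; simp [List.isPrefixOf] at hpre
        refine ih _ _ _ ?_ hacc (by simp at hlen ⊢; omega) q hq
        intro h
        rw [List.mem_cons] at h
        rcases h with h | h
        · exact hc h.symm
        · exact hcur h

theorem pv_splitOn_no_sep (c : Char) (s : List Char) : ∀ p ∈ PySem.Chars.splitOn s [c], c ∉ p := by
  intro p hp
  exact pv_splitOn_go_no_sep c (s.length + 1) s [] [] (by simp) (by simp) (by omega) p hp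

theorem pv_strip_sublist (s : List Char) : (PySem.Chars.strip s).Sublist s := by
  unfold PySem.Chars.strip PySem.Chars.rstrip PySem.Chars.lstrip
  have h2 : (List.dropWhile PySem.Chars.isspace (List.dropWhile PySem.Chars.isspace s).reverse).reverse.Sublist
      ((List.dropWhile PySem.Chars.isspace s).reverse).reverse :=
    List.reverse_sublist.mpr (List.dropWhile_sublist _)
  rw [List.reverse_reverse] at h2
  exact h2.trans (List.dropWhile_sublist _)

-- port of A: literal transliteration of humanize_token (self-recursive on each '+'-part)
def pvHumanizeA (value : List Char) : List Char :=
  let raw := PySem.Chars.strip value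
  if raw = [] then raw
  else if METRIC_LABELS.contains raw then METRIC_LABELS.getD raw raw
  else if GROUP_LABELS.contains raw then GROUP_LABELS.getD raw raw
  else if hplus : PySem.Chars.isIn ['+'] raw = true then
    PySem.Chars.join " + ".toList
      ((PySem.Chars.splitOn raw ['+']).attach.map (fun p => pvHumanizeA p.1))
  else PySem.Chars.replace raw ['_'] [' ']
termination_by value.count '+'
decreasing_by
  have hnp : '+' ∉ p.1 := pv_splitOn_no_sep '+' _ p.1 p.2
  have h1 : p.1.count '+' = 0 := List.count_eq_zero.mpr hnp
  have h2 : '+' ∈ PySem.Chars.strip value := by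
    have := (PySem.Chars.isIn_iff_infix _ _).mp hplus
    exact this.subset (by simp)
  have h3 : '+' ∈ value := (pv_strip_sublist value).subset h2
  have h4 : 0 < value.count '+' := List.count_pos_iff.mpr h3
  omega

def humanize_token (value : String) : String := String.ofList (pvHumanizeA value.toList)

-- ===== PORT B =====
def pvLeaf (tok : List Char) : List Char :=
  let t := PySem.Chars.strip tok
  if t = [] then t
  else if METRIC_LABELS.contains t then METRIC_LABELS.getD t t
  else if GROUP_LABELS.contains t then GROUP_LABELS.getD t t
  else PySem.Chars.replace t ['_'] [' ']

def pvHumanizeB (value : List Char) : List Char :=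
  let raw := PySem.Chars.strip value
  if raw = [] then raw
  else PySem.Chars.join " + ".toList ((PySem.Chars.splitOn raw ['+']).map pvLeaf)

def humanize_token_alt (value : String) : String := String.ofList (pvHumanizeB value.toList)

-- ===== PRECONDITION & SPEC =====
def Spec_humanize_token (value : String) (out : String) : Prop := out = humanize_token_alt value
instance (value : String) (out : String) : Decidable (Spec_humanize_token value out) := by unfold Spec_humanize_token; infer_instance

-- ===== CLAIM (what is proved, stated in full; the proofs are below) =====
def Claim_equal_humanize_token : Prop := ∀ (value : String), Dom_humanize_token value → Spec_humanize_token value (humanize_token value)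

-- ===== LEMMAS AND PROOFS =====
theorem pv_splitOn_go_no_occ (c : Char) : ∀ (fuel : Nat) (l cur : List Char) (acc : List (List Char)),
    c ∉ l → l.length < fuel →
    PySem.Chars.splitOn.go [c] fuel l cur acc = ((cur.reverse ++ l) :: acc).reverse := by
  intro fuel
  induction fuel with
  | zero => intro l cur acc _ h; omega
  | succ n ih =>
    intro l cur acc hnl hlen
    cases l with
    | nil => simp [PySem.Chars.splitOn.go]
    | cons c' rest =>
      have hc : c' ≠ c := fun h => hnl (by simp [h])
      have hpre : [c].isPrefixOf (c' :: rest) = false := by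
        simp [List.isPrefixOf]; exact fun h => absurd h.symm hc
      simp only [PySem.Chars.splitOn.go]
      rw [if_neg (by simp [hpre])]
      rw [ih rest (c' :: cur) acc (fun h => hnl (by simp [h])) (by simp at hlen ⊢; omega)]
      simp

theorem pv_splitOn_no_occ (c : Char) (s : List Char) (h : c ∉ s) :
    PySem.Chars.splitOn s [c] = [s] := by
  unfold PySem.Chars.splitOn
  rw [pv_splitOn_go_no_occ c (s.length + 1) s [] [] h (by omega)]
  simp

theorem pv_dropWhile_prefix {p : Char → Bool} {l t : List Char}
    (h : l.dropWhile p = l) (ht : t <+: l) : t.dropWhile p = t := by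
  cases t with
  | nil => simp
  | cons a t' =>
    obtain ⟨u, hu⟩ := ht
    rw [← hu] at h
    by_cases hpa : p a = true
    · exfalso
      rw [List.cons_append, List.dropWhile_cons_of_pos hpa] at h
      have h1 := congrArg List.length h
      have h2 := List.length_dropWhile_le p (t' ++ u)
      simp at h1 h2
      omega
    · rw [List.dropWhile_cons_of_neg hpa]

theorem pv_strip_idem (s : List Char) : PySem.Chars.strip (PySem.Chars.strip s) = PySem.Chars.strip s := by
  unfold PySem.Chars.strip PySem.Chars.rstrip PySem.Chars.lstrip
  set y := List.dropWhile PySem.Chars.isspace s with hy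
  have hy_drop : y.dropWhile PySem.Chars.isspace = y := by
    rw [hy]; exact List.dropWhile_idempotent ..
  have h1 : ((List.dropWhile PySem.Chars.isspace y.reverse).reverse).dropWhile PySem.Chars.isspace
      = (List.dropWhile PySem.Chars.isspace y.reverse).reverse := by
    apply pv_dropWhile_prefix hy_drop
    rw [← List.reverse_suffix]
    simpa using List.dropWhile_suffix (l := y.reverse) (p := PySem.Chars.isspace)
  rw [h1]
  congr 1
  rw [List.reverse_reverse]
  exact List.dropWhile_idempotent ..

-- for a '+'-free token, A's recursive call reduces to B's leaf
theorem pv_humanizeA_leaf (p : List Char) (h : '+' ∉ p) : pvHumanizeA p = pvLeaf p := by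
  rw [pvHumanizeA, pvLeaf]
  have hni : ¬ PySem.Chars.isIn ['+'] (PySem.Chars.strip p) = true := by
    rw [PySem.Chars.isIn_iff_infix]
    intro hinf
    exact h ((pv_strip_sublist p).subset (hinf.subset (by simp)))
  simp only [dif_neg hni]

theorem pv_main (s : List Char) : pvHumanizeA s = pvHumanizeB s := by
  rw [pvHumanizeA, pvHumanizeB]
  by_cases h0 : PySem.Chars.strip s = []
  · simp [h0]
  set raw := PySem.Chars.strip s with hraw
  have hidem : PySem.Chars.strip raw = raw := pv_strip_idem s
  simp only [if_neg h0]
  by_cases hm : METRIC_LABELS.contains raw = true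
  · -- raw is one of the metric keys: both sides compute to the label
    have hkeys : raw = "cosine".toList ∨ raw = "lpips".toList ∨ raw = "aji".toList ∨
        raw = "pq".toList ∨ raw = "fud".toList ∨ raw = "style_hed".toList := by
      simp [METRIC_LABELS, PySem.Dict.contains] at hm
      tauto
    rcases hkeys with h | h | h | h | h | h <;> rw [h] <;> decide
  · rw [if_neg hm]
    by_cases hg : GROUP_LABELS.contains raw = true
    · have hkeys : raw = "cell_types".toList ∨ raw = "cell_state".toList ∨
          raw = "vasculature".toList ∨ raw = "microenv".toList := by
        simp [GROUP_LABELS, PySem.Dict.contains] at hg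
        tauto
      rcases hkeys with h | h | h | h <;> rw [h] <;> decide
    · rw [if_neg hg]
      by_cases hp : PySem.Chars.isIn ['+'] raw = true
      · rw [dif_pos hp]
        congr 1
        rw [List.attach_map_val (f := pvHumanizeA)]
        apply List.map_congr_left
        intro p hpmem
        exact pv_humanizeA_leaf p (pv_splitOn_no_sep '+' raw p hpmem)
      · rw [dif_neg hp]
        have hnp : '+' ∉ raw := by
          intro hmem
          apply hp
          rw [PySem.Chars.isIn_iff_infix]
          obtain ⟨l1, l2, heq⟩ := List.append_of_mem hmem
          exact ⟨l1, l2, by simp [heq]⟩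
        rw [pv_splitOn_no_occ '+' raw hnp]
        simp only [List.map_cons, List.map_nil]
        rw [PySem.Chars.join_singleton]
        rw [pvLeaf]
        simp only [hidem, if_neg h0, if_neg hm, if_neg hg]

-- ===== VERDICT (by name: the statement is the Claim_ definition above) =====
theorem humanize_token_spec : Claim_equal_humanize_token := by
  intro value _
  unfold Spec_humanize_token humanize_token humanize_token_alt
  rw [pv_main]
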